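-- pv_equiv track=rewrite | github.com/981377660LMT/algorithm-study | 16_滑动窗口/母题-寻找第一个连续k个1的区间.py | indexOfKOnes1
-- ===== SOURCE A (Python) =====
-- from typing import List
--
-- def indexOfKOnes1(nums: List[int], k: int) -> int:
--     """dp寻找第一个连续k个1的区间起点,不存在则返回-1"""
--     dp = 0
--     for i, num in enumerate(nums):
--         if num == 1:
--             dp += 1
--             if dp == k:
--                 return i - k + 1
--         else:
--             dp = 0
--     return -1
-- ===== SOURCE B (Python) =====
-- def indexOfKOnes1(nums, k):
--     if k <= 0 or k > len(nums):
--         return -1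
--     s = ''.join('1' if x == 1 else '0' for x in nums)
--     return s.find('1' * k)
-- ===== Notes on version B (the rewrite author's own statement) =====
-- stated objective: idiomatic
-- what changed: Replaces the manual run-length dp loop with building a 0/1 string once and using str.find('1'*k) to locate the first run of k ones (guarding k <= 0 and k > len(nums) with -1, where no window can exist).
import Mathlib
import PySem

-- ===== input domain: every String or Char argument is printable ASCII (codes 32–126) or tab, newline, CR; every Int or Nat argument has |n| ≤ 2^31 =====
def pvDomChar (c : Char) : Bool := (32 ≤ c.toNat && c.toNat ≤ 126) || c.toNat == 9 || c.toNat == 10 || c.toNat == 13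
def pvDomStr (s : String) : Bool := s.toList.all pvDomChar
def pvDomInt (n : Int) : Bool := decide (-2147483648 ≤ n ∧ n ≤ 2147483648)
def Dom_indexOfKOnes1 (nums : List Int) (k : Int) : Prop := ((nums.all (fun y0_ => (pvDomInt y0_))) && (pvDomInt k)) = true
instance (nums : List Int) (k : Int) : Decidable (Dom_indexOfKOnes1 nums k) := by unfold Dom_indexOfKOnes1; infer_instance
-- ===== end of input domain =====

-- B replaces A's run-length dp loop by building a '0'/'1' string once and
-- searching it for '1'*k with str.find (idiomatic; a k ≤ 0 guard returns -1 as A does).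

-- ===== PORT A =====
-- the for-loop with its early return: state (i, dp), one step per element
def indexOfKOnes1Loop (k : Int) : List Int → Int → Int → Int
  | [], _, _ => -1
  | num :: rest, i, dp =>
    if num = 1 then
      if dp + 1 = k then i - k + 1
      else indexOfKOnes1Loop k rest (i + 1) (dp + 1)
    else indexOfKOnes1Loop k rest (i + 1) 0

def indexOfKOnes1 (nums : List Int) (k : Int) : Int :=
  indexOfKOnes1Loop k nums 0 0

-- ===== PORT B =====
def indexOfKOnes1_alt (nums : List Int) (k : Int) : Int :=
  if k ≤ 0 ∨ (nums.length : Int) < k then -1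
  else
    -- s = ''.join('1' if x == 1 else '0' for x in nums); return s.find('1' * k)
    let s : String := String.ofList (nums.map (fun x => if x = 1 then '1' else '0'))
    PySem.Str.find s (String.ofList (List.replicate k.toNat '1'))

-- ===== PRECONDITION & SPEC =====
def Spec_indexOfKOnes1 (nums : List Int) (k : Int) (out : Int) : Prop := out = indexOfKOnes1_alt nums k
instance (nums : List Int) (k : Int) (out : Int) : Decidable (Spec_indexOfKOnes1 nums k out) := by unfold Spec_indexOfKOnes1; infer_instance

-- ===== CLAIM (what is proved, stated in full; the proofs are below) =====
def Claim_equal_indexOfKOnes1 : Prop := ∀ (nums : List Int) (k : Int), Dom_indexOfKOnes1 nums k → Spec_indexOfKOnes1 nums k (indexOfKOnes1 nums k)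

-- ===== LEMMAS AND PROOFS =====

-- the encoding B applies elementwise
def pvEnc (x : Int) : Char := if x = 1 then '1' else '0'

-- find returns 0 when the needle is a prefix
theorem pv_find_of_prefix (s sub : List Char) (h : sub <+: s) :
    PySem.Chars.find s sub = 0 := by
  have hne : PySem.Chars.find s sub ≠ -1 := (PySem.Chars.find_ne_neg_one_iff s sub).mpr h.isInfix
  have hnn : 0 ≤ PySem.Chars.find s sub := by
    have := PySem.Chars.neg_one_le_find s sub
    omega
  have hspec := PySem.Chars.find_spec hnn
  by_contra hne0
  exact hspec.2 0 (by omega) (by simpa using h)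

-- no occurrence starts before m  ⇒  find on s is m + find on s.drop m (or -1)
theorem pv_find_shift (s sub : List Char) (m : Nat)
    (h : ∀ i, i < m → ¬ sub <+: s.drop i) :
    PySem.Chars.find s sub =
      (if PySem.Chars.find (s.drop m) sub = -1 then -1
       else (m : Int) + PySem.Chars.find (s.drop m) sub) := by
  by_cases hd : PySem.Chars.find (s.drop m) sub = -1
  · rw [if_pos hd, PySem.Chars.find_eq_neg_one_iff]
    rw [PySem.Chars.find_eq_neg_one_iff] at hd
    intro hinf
    obtain ⟨j, hj⟩ := (PySem.Chars.exists_prefix_drop_iff_isIn sub s).mpr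
      ((PySem.Chars.isIn_iff_infix sub s).mpr hinf)
    by_cases hjm : j < m
    · exact h j hjm hj
    · exact hd <| (PySem.Chars.isIn_iff_infix sub (s.drop m)).mp <|
        (PySem.Chars.exists_prefix_drop_iff_isIn sub (s.drop m)).mp
          ⟨j - m, by rw [List.drop_drop, show m + (j - m) = j from by omega]; exact hj⟩
  · rw [if_neg hd]
    have hr0 : 0 ≤ PySem.Chars.find (s.drop m) sub := by
      have := PySem.Chars.neg_one_le_find (s.drop m) sub
      omega
    obtain ⟨hpre, hmin⟩ := PySem.Chars.find_spec hr0
    set r := (PySem.Chars.find (s.drop m) sub).toNat with hrdef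
    have hpre' : sub <+: s.drop (m + r) := by rwa [List.drop_drop] at hpre
    have hne : PySem.Chars.find s sub ≠ -1 := by
      rw [PySem.Chars.find_ne_neg_one_iff]
      exact (PySem.Chars.isIn_iff_infix sub s).mp
        ((PySem.Chars.exists_prefix_drop_iff_isIn sub s).mp ⟨m + r, hpre'⟩)
    have hq0 : 0 ≤ PySem.Chars.find s sub := by
      have := PySem.Chars.neg_one_le_find s sub
      omega
    obtain ⟨hqpre, hqmin⟩ := PySem.Chars.find_spec hq0
    set q := (PySem.Chars.find s sub).toNat with hqdef
    have hq_le : q ≤ m + r := by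
      by_contra hlt
      exact hqmin (m + r) (by omega) hpre'
    have hq_ge : m + r ≤ q := by
      by_contra hlt
      have hlt' : q < m + r := by omega
      by_cases hqm : q < m
      · exact h q hqm hqpre
      · exact hmin (q - m) (by omega)
          (by rw [List.drop_drop, show m + (q - m) = q from by omega]; exact hqpre)
    omega

-- a run of k ones cannot start at or before a position holding a non-1 element
theorem pv_no_occ_at_blocked (pre : List Int) (num : Int) (rest : List Int) (kn : Nat)
    (hnum : num ≠ 1) (hlen : pre.length < kn) (j : Nat) (hj : j ≤ pre.length) :
    ¬ List.replicate kn '1' <+: ((pre ++ num :: rest).map pvEnc).drop j := by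
  intro hp
  have hidx : pre.length - j < kn := by omega
  have hlen_t : pre.length < ((pre ++ num :: rest).map pvEnc).length := by simp
  have hdroplen : pre.length - j < (((pre ++ num :: rest).map pvEnc).drop j).length := by
    simp; omega
  have hget := hp.getElem (i := pre.length - j) (by simp [hidx])
  have h2 : (((pre ++ num :: rest).map pvEnc).drop j)[pre.length - j]'hdroplen
      = ((pre ++ num :: rest).map pvEnc)[pre.length]'hlen_t := by
    rw [List.getElem_drop]
    congr 1
    omega
  have h3 : ((pre ++ num :: rest).map pvEnc)[pre.length]'hlen_t = '0' := by
    rw [List.getElem_map]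
    rw [show (pre ++ num :: rest)[pre.length]'(by simpa using hlen_t) = num from by
      simp [List.getElem_append_right (le_refl pre.length)]]
    simp [pvEnc, hnum]
  have hcontra := hget.trans (h2.trans h3)
  simp at hcontra

-- A's loop, with dp pending ones, equals B's search on replicate dp 1 ++ nums (shifted)
theorem pv_loop_eq (k : Int) (hk : 1 ≤ k) (nums : List Int) :
    ∀ (i dp : Int), 0 ≤ dp → dp < k →
      indexOfKOnes1Loop k nums i dp =
        (if PySem.Chars.find ((List.replicate dp.toNat 1 ++ nums).map pvEnc)
              (List.replicate k.toNat '1') = -1 then -1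
         else i - dp + PySem.Chars.find ((List.replicate dp.toNat 1 ++ nums).map pvEnc)
              (List.replicate k.toNat '1')) := by
  induction nums with
  | nil =>
    intro i dp h0 hdk
    have hfind : PySem.Chars.find ((List.replicate dp.toNat (1:Int) ++ []).map pvEnc)
        (List.replicate k.toNat '1') = -1 := by
      rw [PySem.Chars.find_eq_neg_one_iff]
      intro hinf
      have := hinf.length_le
      simp at this
      omega
    rw [hfind, if_pos rfl]
    rfl
  | cons num rest ih =>
    intro i dp h0 hdk
    by_cases h1 : num = 1
    · subst h1
      by_cases hdone : dp + 1 = k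
      · -- returns i - k + 1; the needle is a prefix of the haystack
        have hpref : List.replicate k.toNat '1' <+:
            (List.replicate dp.toNat (1:Int) ++ 1 :: rest).map pvEnc := by
          have hrepl : (List.replicate dp.toNat (1:Int) ++ 1 :: rest) =
              List.replicate k.toNat (1:Int) ++ rest := by
            rw [show k.toNat = dp.toNat + 1 from by omega, List.replicate_succ']
            simp
          rw [hrepl, List.map_append]
          exact ⟨rest.map pvEnc, by simp [pvEnc]⟩
        rw [show indexOfKOnes1Loop k (1 :: rest) i dp =
            (if dp + 1 = k then i - k + 1 else indexOfKOnes1Loop k rest (i + 1) (dp + 1))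
          from by simp [indexOfKOnes1Loop]]
        rw [if_pos hdone, pv_find_of_prefix _ _ hpref, if_neg (by omega)]
        omega
      · -- recurse: same haystack, shifted bookkeeping
        have hstep : (List.replicate (dp+1).toNat (1:Int) ++ rest) =
            (List.replicate dp.toNat (1:Int) ++ 1 :: rest) := by
          rw [show (dp+1).toNat = dp.toNat + 1 from by omega, List.replicate_succ']
          simp
        have hrec := ih (i + 1) (dp + 1) (by omega) (by omega)
        rw [hstep] at hrec
        rw [show indexOfKOnes1Loop k (1 :: rest) i dp =
            (if dp + 1 = k then i - k + 1 else indexOfKOnes1Loop k rest (i + 1) (dp + 1))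
          from by simp [indexOfKOnes1Loop]]
        rw [if_neg hdone, hrec, show i + 1 - (dp + 1) = i - dp from by ring]
    · -- run broken: no occurrence can start at positions 0..dp, shift by dp+1
      have hblock : ∀ j, j < dp.toNat + 1 →
          ¬ List.replicate k.toNat '1' <+:
            (((List.replicate dp.toNat (1:Int)) ++ num :: rest).map pvEnc).drop j := by
        intro j hj
        have hl1 : (List.replicate dp.toNat (1:Int)).length < k.toNat := by
          simp only [List.length_replicate]; omega
        have hl2 : j ≤ (List.replicate dp.toNat (1:Int)).length := by
          simp only [List.length_replicate]; omega
        exact pv_no_occ_at_blocked (List.replicate dp.toNat 1) num rest k.toNat h1 hl1 j hl2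
      have hshift := pv_find_shift
        ((List.replicate dp.toNat (1:Int) ++ num :: rest).map pvEnc)
        (List.replicate k.toNat '1') (dp.toNat + 1) hblock
      have hdrop : ((List.replicate dp.toNat (1:Int) ++ num :: rest).map pvEnc).drop
          (dp.toNat + 1) = rest.map pvEnc := by
        rw [List.map_append,
          show dp.toNat + 1 = (List.map pvEnc (List.replicate dp.toNat (1:Int))).length + 1
            from by simp,
          List.drop_append]
        simp
      rw [hdrop] at hshift
      have hrest := ih (i + 1) 0 (by omega) (by omega)
      simp only [Int.toNat_zero, List.replicate_zero, List.nil_append] at hrest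
      rw [show indexOfKOnes1Loop k (num :: rest) i dp = indexOfKOnes1Loop k rest (i + 1) 0
        from by simp [indexOfKOnes1Loop, h1]]
      rw [hrest, hshift]
      by_cases hr : PySem.Chars.find (rest.map pvEnc) (List.replicate k.toNat '1') = -1
      · rw [if_pos hr, if_pos hr, if_pos rfl]
      · have hr0 : 0 ≤ PySem.Chars.find (rest.map pvEnc) (List.replicate k.toNat '1') := by
          have := PySem.Chars.neg_one_le_find (rest.map pvEnc) (List.replicate k.toNat '1')
          omega
        rw [if_neg hr, if_neg hr, if_neg (by push_cast; omega)]
        push_cast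
        omega

-- ===== VERDICT (by name: the statement is the Claim_ definition above) =====
theorem indexOfKOnes1_spec : Claim_equal_indexOfKOnes1 := by
  unfold Claim_equal_indexOfKOnes1
  intro nums k _
  unfold Spec_indexOfKOnes1 indexOfKOnes1 indexOfKOnes1_alt
  by_cases hk : k ≤ 0 ∨ (nums.length : Int) < k
  swap
  · -- 1 ≤ k ≤ len nums: the main lemma with dp = 0
    rw [if_neg hk]
    have hk1 : 1 ≤ k := by omega
    have hmain := pv_loop_eq k hk1 nums 0 0 le_rfl (by omega)
    simp only [Int.toNat_zero, List.replicate_zero, List.nil_append] at hmain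
    rw [hmain]
    simp only [PySem.Str.find_eq, String.toList_ofList]
    rw [show (nums.map fun x => if x = 1 then '1' else '0') = nums.map pvEnc from rfl]
    split <;> omega
  rw [if_pos hk]
  by_cases hk0 : k ≤ 0
  · -- k ≤ 0: dp starts at 0 and only grows while nonnegative; dp + 1 = k never fires
    have hall : ∀ (xs : List Int) (i dp : Int), 0 ≤ dp → indexOfKOnes1Loop k xs i dp = -1 := by
      intro xs
      induction xs with
      | nil => intro i dp _; rfl
      | cons x rest ih =>
        intro i dp h0
        simp only [indexOfKOnes1Loop]
        split
        · rw [if_neg (by omega)]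
          exact ih _ _ (by omega)
        · exact ih _ _ (by omega)
    exact hall nums 0 0 le_rfl
  · -- k > len nums: the needle is longer than the haystack, find is -1, and so is A
    have hlen : (nums.length : Int) < k := by tauto
    have hmain := pv_loop_eq k (by omega) nums 0 0 le_rfl (by omega)
    simp only [Int.toNat_zero, List.replicate_zero, List.nil_append] at hmain
    have hfind : PySem.Chars.find (nums.map pvEnc) (List.replicate k.toNat '1') = -1 := by
      rw [PySem.Chars.find_eq_neg_one_iff]
      intro hinf
      have := hinf.length_le
      simp at this
      omega
    rw [hmain, hfind, if_pos rfl]
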